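-- pv_equiv track=rewrite | github.com/vodobryshkin/ITMO | 1 Курс/Информатика/Лабораторная №4/general_tools/program_tools.py | clean_spaces
-- ===== SOURCE A (Python) =====
-- def clean_spaces(s):
--     res = ''
--     f = True
--
--     for i in range(len(s)):
--         # Если встречается n подряд табуляций, пробелов или символов новой строки, то меняем всю последовательность на
--         # один пробел
--         if (s[i] == ' ' or s[i] == '\t' or s[i] == '\n') and f:
--             res += ' '
--             f = False
--         elif s[i] != ' ' and s[i] != '\t' and s[i] != '\n':
--             res += s[i]
--             f = True
--
--     # Очистка последовательностей от пробелов в начале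
--     return res[:].strip() + ','
-- ===== SOURCE B (Python) =====
-- def clean_spaces(s):
--     words = s.replace('\t', ' ').replace('\n', ' ').split(' ')
--     return ' '.join(w for w in words if w).strip() + ','
-- ===== Notes on version B (the rewrite author's own statement) =====
-- stated objective: faster
-- what changed: The manual flag-based state machine with char-by-char string concatenation is replaced by a split/filter/join pipeline: tabs and newlines are turned into spaces, the string is split on spaces, empty tokens are dropped, the words are re-joined with single spaces, then stripped and a comma appended.
import Mathlib
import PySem

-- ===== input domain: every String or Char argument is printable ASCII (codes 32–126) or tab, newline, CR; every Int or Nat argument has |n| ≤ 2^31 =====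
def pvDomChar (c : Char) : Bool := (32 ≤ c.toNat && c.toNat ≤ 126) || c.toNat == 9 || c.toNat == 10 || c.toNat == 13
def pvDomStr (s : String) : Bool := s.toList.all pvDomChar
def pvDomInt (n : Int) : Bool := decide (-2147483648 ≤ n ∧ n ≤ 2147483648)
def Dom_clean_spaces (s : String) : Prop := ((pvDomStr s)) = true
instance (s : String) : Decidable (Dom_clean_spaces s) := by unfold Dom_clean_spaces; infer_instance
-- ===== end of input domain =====

-- B replaces A's flag-based state machine by a replace/split/filter/join pipeline (objective: faster, measured).

-- ===== PORT A =====
-- A builds `res` char by char with a flag `f` collapsing runs of ' ', '\t', '\n'; finally strips and appends ','.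
def clean_spaces (s : String) : String :=
  let r := s.toList.foldl (fun (st : List Char × Bool) c =>
    if (c == ' ' || c == '\t' || c == '\n') && st.2 then (st.1 ++ [' '], false)
    else if !(c == ' ') && !(c == '\t') && !(c == '\n') then (st.1 ++ [c], true)
    else st) ([], true)
  String.ofList (PySem.Chars.strip r.1 ++ [','])

-- ===== PORT B =====
-- Source B: s.replace('\t',' ').replace('\n',' ').split(' '), drop empty words, ' '.join, strip, + ','
def clean_spaces_alt (s : String) : String :=
  let words := PySem.Chars.splitOn
    (PySem.Chars.replace (PySem.Chars.replace s.toList ['\t'] [' ']) ['\n'] [' ']) [' ']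
  String.ofList (PySem.Chars.strip (PySem.Chars.join [' '] (words.filter (fun w => w ≠ []))) ++ [','])


-- ===== PRECONDITION & SPEC =====
def Spec_clean_spaces (s : String) (out : String) : Prop := out = clean_spaces_alt s
instance (s : String) (out : String) : Decidable (Spec_clean_spaces s out) := by unfold Spec_clean_spaces; infer_instance

-- ===== CLAIM (what is proved, stated in full; the proofs are below) =====
def Claim_equal_clean_spaces : Prop := ∀ (s : String), Dom_clean_spaces s → Spec_clean_spaces s (clean_spaces s)

-- ===== LEMMAS AND PROOFS =====


lemma replace_go_single (a b : Char) :
    ∀ (fuel : Nat) (l acc : List Char), l.length ≤ fuel →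
      PySem.Chars.replace.go [a] [b] fuel l acc
        = acc.reverse ++ l.map (fun c => if a == c then b else c) := by
  intro fuel
  induction fuel with
  | zero =>
    intro l acc h
    cases l with
    | nil => simp [PySem.Chars.replace.go]
    | cons c t => simp at h
  | succ n ih =>
    intro l acc h
    cases l with
    | nil => simp [PySem.Chars.replace.go]
    | cons c t =>
      simp only [PySem.Chars.replace.go, List.isPrefixOf, List.length_cons] at *
      by_cases hac : a = c
      · subst hac; simp [ih t _ (by omega)]
      · simp [hac, ih t _ (by omega)]

lemma replace_single (l : List Char) (a b : Char) :
    PySem.Chars.replace l [a] [b] = l.map (fun c => if a == c then b else c) := by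
  simp [PySem.Chars.replace, replace_go_single a b l.length l [] le_rfl]

def modHead (g : List Char → List Char) : List (List Char) → List (List Char)
  | [] => []
  | x :: xs => g x :: xs

def splitSp : List Char → List (List Char)
  | [] => [[]]
  | c :: cs => if c == ' ' then [] :: splitSp cs else modHead (c :: ·) (splitSp cs)

lemma splitSp_ne_nil (l : List Char) : splitSp l ≠ [] := by
  induction l with
  | nil => simp [splitSp]
  | cons c cs ih =>
    simp only [splitSp]
    split
    · simp
    · cases h : splitSp cs with
      | nil => exact absurd h ih
      | cons p ps => simp [modHead]

lemma splitOn_go_single :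
    ∀ (fuel : Nat) (l cur : List Char) (acc : List (List Char)), l.length ≤ fuel →
      PySem.Chars.splitOn.go [' '] fuel l cur acc
        = acc.reverse ++ modHead (cur.reverse ++ ·) (splitSp l) := by
  intro fuel
  induction fuel with
  | zero =>
    intro l cur acc h
    cases l with
    | nil => simp [PySem.Chars.splitOn.go, splitSp, modHead]
    | cons c t => simp at h
  | succ n ih =>
    intro l cur acc h
    cases l with
    | nil => simp [PySem.Chars.splitOn.go, splitSp, modHead]
    | cons c t =>
      simp only [PySem.Chars.splitOn.go, List.isPrefixOf, List.length_cons] at *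
      by_cases hc : ' ' = c
      · subst hc
        simp only [BEq.rfl, Bool.and_self, if_pos, List.length_nil, Nat.zero_add,
          List.drop_succ_cons, List.drop_zero]
        rw [ih t [] _ (by omega)]
        cases hsp : splitSp t with
        | nil => exact absurd hsp (splitSp_ne_nil t)
        | cons p ps => simp [splitSp, hsp, modHead]
      · have hcc : (' ' == c) = false := by simp [hc]
        simp only [hcc, Bool.false_and, Bool.false_eq_true, if_false]
        rw [ih t (c :: cur) acc (by omega)]
        have hcc2 : (c == ' ') = false := by simp [Ne.symm hc]
        cases hsp : splitSp t with
        | nil => exact absurd hsp (splitSp_ne_nil t)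
        | cons p ps => simp [splitSp, hcc2, hsp, modHead]

lemma splitOn_single (l : List Char) : PySem.Chars.splitOn l [' '] = splitSp l := by
  rw [PySem.Chars.splitOn, splitOn_go_single (l.length + 1) l [] [] (by omega)]
  cases h : splitSp l with
  | nil => exact absurd h (splitSp_ne_nil l)
  | cons p ps => simp [modHead]

def pvG (c : Char) : Char :=
  if ('\n' == (if '\t' == c then ' ' else c)) then ' ' else (if '\t' == c then ' ' else c)

def collapseSp : Bool → List Char → List Char
  | _, [] => []
  | f, c :: cs => if c == ' ' then (if f then ' ' :: collapseSp false cs else collapseSp false cs)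
                  else c :: collapseSp true cs

def Jn (l : List Char) : List Char := PySem.Chars.join [' '] ((splitSp l).filter (fun w => w ≠ []))

lemma foldA (l : List Char) : ∀ (res : List Char) (f : Bool),
    (l.foldl (fun (st : List Char × Bool) c =>
      if (c == ' ' || c == '\t' || c == '\n') && st.2 then (st.1 ++ [' '], false)
      else if !(c == ' ') && !(c == '\t') && !(c == '\n') then (st.1 ++ [c], true)
      else st) (res, f)).1 = res ++ collapseSp f (l.map pvG) := by
  induction l with
  | nil => intro res f; simp [collapseSp]
  | cons c cs ih =>
    intro res f
    by_cases hws : c = ' ' ∨ c = '\t' ∨ c = '\n'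
    · have hg : pvG c = ' ' := by
        rcases hws with h | h | h <;> subst h <;> decide
      cases f with
      | true =>
        simp only [List.foldl_cons, List.map_cons, hg]
        have hcond : ((c == ' ' || c == '\t' || c == '\n') && true) = true := by
          rcases hws with h | h | h <;> subst h <;> simp
        rw [if_pos hcond, ih]
        simp [collapseSp]
      | false =>
        simp only [List.foldl_cons, List.map_cons, hg]
        have hcond : ((c == ' ' || c == '\t' || c == '\n') && false) = false := by simp
        rw [if_neg (by simp [hcond])]
        have h2 : (!(c == ' ') && !(c == '\t') && !(c == '\n')) = false := by
          rcases hws with h | h | h <;> subst h <;> simp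
        rw [if_neg (by simp [h2]), ih]
        simp [collapseSp]
    · simp only [not_or] at hws
      obtain ⟨h1, h2, h3⟩ := hws
      have hg : pvG c = c := by simp [pvG, Ne.symm h2, Ne.symm h3]
      simp only [List.foldl_cons, List.map_cons, hg]
      have hcond : ((c == ' ' || c == '\t' || c == '\n') && f) = false := by
        simp [h1, h2, h3]
      rw [if_neg (by simp [hcond])]
      rw [if_pos (by simp [h1, h2, h3]), ih]
      simp [collapseSp, h1]

lemma collapseSp_false (cs : List Char) :
    collapseSp false cs = collapseSp true (cs.dropWhile (· == ' ')) := by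
  induction cs with
  | nil => simp [collapseSp]
  | cons c t ih =>
    by_cases hc : c = ' '
    · subst hc; simpa [collapseSp, List.dropWhile_cons] using ih
    · simp [collapseSp, hc]

lemma Jn_sp_cons (cs : List Char) : Jn (' ' :: cs) = Jn cs := by
  simp [Jn, splitSp]

lemma Jn_dropWhile (l : List Char) : Jn (l.dropWhile (· == ' ')) = Jn l := by
  induction l with
  | nil => simp
  | cons c t ih =>
    by_cases hc : c = ' '
    · subst hc; rw [List.dropWhile_cons_of_pos (by simp), ih, Jn_sp_cons]
    · rw [List.dropWhile_cons_of_neg (by simp [hc])]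

lemma splitSp_allspace (l : List Char) (h : ∀ x ∈ l, x = ' ') :
    splitSp l = List.replicate (l.length + 1) [] := by
  induction l with
  | nil => simp [splitSp]
  | cons c t ih =>
    have hc : c = ' ' := h c (by simp)
    subst hc
    simp [splitSp, ih (fun x hx => h x (by simp [hx])), List.replicate_succ]

lemma filter_splitSp_ne_nil (l : List Char) (h : ∃ x ∈ l, x ≠ ' ') :
    (splitSp l).filter (fun w => w ≠ []) ≠ [] := by
  induction l with
  | nil => simp at h
  | cons c t ih =>
    by_cases hc : c = ' '
    · subst hc
      obtain ⟨x, hx, hxne⟩ := h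
      rcases List.mem_cons.mp hx with hx | hx
      · exact absurd hx hxne
      · simpa [splitSp] using ih ⟨x, hx, hxne⟩
    · cases hsp : splitSp t with
      | nil => exact absurd hsp (splitSp_ne_nil t)
      | cons p ps => simp [splitSp, hc, hsp, modHead]

lemma strip_sp_left (x : List Char) : PySem.Chars.strip (' ' :: x) = PySem.Chars.strip x := by
  simp [PySem.Chars.strip, PySem.Chars.lstrip, PySem.Chars.isspace]

lemma rstrip_sp (y : List Char) : PySem.Chars.rstrip (y ++ [' ']) = PySem.Chars.rstrip y := by
  simp [PySem.Chars.rstrip, PySem.Chars.isspace]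

lemma strip_sp_right (x : List Char) : PySem.Chars.strip (x ++ [' ']) = PySem.Chars.strip x := by
  rw [PySem.Chars.strip, PySem.Chars.strip]
  have hl : PySem.Chars.lstrip (x ++ [' '])
      = if (PySem.Chars.lstrip x).isEmpty then [] else PySem.Chars.lstrip x ++ [' '] := by
    simp [PySem.Chars.lstrip, List.dropWhile_append, PySem.Chars.isspace]
  rw [hl]
  split_ifs with h
  · have hx : PySem.Chars.lstrip x = [] := by simpa [List.isEmpty_iff] using h
    simp [hx, PySem.Chars.rstrip]
  · exact rstrip_sp _

lemma join_cons_ne (c : Char) (x : List Char) (L : List (List Char)) :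
    PySem.Chars.join [' '] ((c :: x) :: L) = c :: PySem.Chars.join [' '] (x :: L) := by
  cases L with
  | nil => simp [PySem.Chars.join, List.intercalate]
  | cons y ys => simp [PySem.Chars.join, List.intercalate]

lemma M : ∀ (n : Nat) (l : List Char), l.length ≤ n →
    collapseSp true l
      = (if l.head? = some ' ' then [' '] else [])
        ++ Jn l
        ++ (if (∃ x ∈ l, x ≠ ' ') ∧ l.getLast? = some ' ' then [' '] else []) := by
  intro n
  induction n with
  | zero =>
    intro l h
    have : l = [] := List.eq_nil_of_length_eq_zero (Nat.le_zero.mp h)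
    subst this
    simp [collapseSp, Jn, splitSp, PySem.Chars.join, List.intercalate]
  | succ n ih =>
    intro l h
    cases l with
    | nil => simp [collapseSp, Jn, splitSp, PySem.Chars.join, List.intercalate]
    | cons c cs =>
      by_cases hc : c = ' '
      · subst hc
        -- LHS: ' ' :: collapseSp true u, u = dropWhile
        have hL : collapseSp true (' ' :: cs)
            = ' ' :: collapseSp true (cs.dropWhile (· == ' ')) := by
          simp [collapseSp, collapseSp_false]
        set u := cs.dropWhile (· == ' ') with hu
        have hlen : u.length ≤ n := by
          rw [hu]
          have := List.length_dropWhile_le (p := (· == ' ')) (l := cs)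
          simp only [List.length_cons] at h; omega
        cases huc : u with
        | nil =>
          have hall : ∀ x ∈ cs, x = ' ' := by
            intro x hx
            by_contra hne
            have : (cs.dropWhile (· == ' ')) ≠ [] := by
              intro hnil
              have := List.dropWhile_eq_nil_iff.mp hnil x hx
              simp at this; exact hne this
            exact this (by rw [← hu, huc])
          have hJ : Jn (' ' :: cs) = [] := by
            rw [Jn, splitSp_allspace _ (by intro x hx; rcases List.mem_cons.mp hx with h1 | h1
                                           · exact h1
                                           · exact hall x h1)]
            simp [PySem.Chars.join, List.intercalate]
          have hany : ¬ (∃ x ∈ (' ' :: cs), x ≠ ' ') := by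
            rintro ⟨x, hx, hne⟩
            rcases List.mem_cons.mp hx with h1 | h1
            · exact hne h1
            · exact hne (hall x h1)
          rw [hL, huc, hJ]
          have : ¬ ((∃ x ∈ (' ' :: cs), x ≠ ' ') ∧ (' ' :: cs).getLast? = some ' ') :=
            fun hh => hany hh.1
          rw [if_neg this]
          simp [collapseSp]
        | cons d ds =>
          have hdne : d ≠ ' ' := by
            have := List.head?_dropWhile_not (p := (· == ' ')) (l := cs)
            rw [← hu, huc] at this
            simpa using this
          have hIH := ih u hlen
          rw [huc] at hIH
          rw [if_neg (by simp [hdne]), List.nil_append] at hIH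
          rw [hL, huc, hIH]
          have hJ : Jn (' ' :: cs) = Jn (d :: ds) := by
            rw [Jn_sp_cons, ← Jn_dropWhile cs, ← hu, huc]
          have hdcs : d ∈ cs := by
            have hsub : List.Sublist u cs := by
              rw [hu]; exact List.dropWhile_sublist fun x => x == ' '
            exact hsub.mem (by rw [huc]; exact List.mem_cons_self)
          have hex1 : ∃ x ∈ (' ' :: cs), x ≠ ' ' := ⟨d, by simp [hdcs], hdne⟩
          have hex2 : ∃ x ∈ (d :: ds), x ≠ ' ' := ⟨d, by simp, hdne⟩
          have hlast : (' ' :: cs).getLast? = (d :: ds).getLast? := by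
            have hcs : cs = cs.takeWhile (· == ' ') ++ u := by
              rw [hu, List.takeWhile_append_dropWhile]
            have h1 : (' ' :: cs).getLast? = cs.getLast? := by
              have h2 : (' ' :: cs) = [' '] ++ cs := rfl
              rw [h2, List.getLast?_append_of_ne_nil _ (by rw [hcs, huc]; simp)]
            rw [h1, hcs, huc, List.getLast?_append_of_ne_nil _ (by simp)]
          have htr : ((∃ x ∈ (' ' :: cs), x ≠ ' ') ∧ (' ' :: cs).getLast? = some ' ')
              ↔ ((∃ x ∈ (d :: ds), x ≠ ' ') ∧ (d :: ds).getLast? = some ' ') := by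
            constructor
            · rintro ⟨-, h2⟩; exact ⟨hex2, by rw [← hlast]; exact h2⟩
            · rintro ⟨-, h2⟩; exact ⟨hex1, by rw [hlast]; exact h2⟩
          simp only [htr, hJ]
          rw [if_pos (show (' ' :: cs).head? = some ' ' by simp)]
          simp
      · -- c ≠ ' '
        have hL : collapseSp true (c :: cs) = c :: collapseSp true cs := by
          simp [collapseSp, hc]
        cases cs with
        | nil =>
          rw [hL]
          have hJ : Jn [c] = [c] := by
            rw [Jn, splitSp]
            rw [if_neg (by simp [hc])]
            simp [splitSp, modHead, PySem.Chars.join_singleton]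
          rw [hJ]
          rw [if_neg (by simp [hc]), if_neg (by rintro ⟨-, hh⟩; exact hc (by simpa using hh))]
          simp [collapseSp]
        | cons e es =>
          have hIH := ih (e :: es) (by simp at h ⊢; omega)
          have hlast : (c :: e :: es).getLast? = (e :: es).getLast? := by
            have h2 : (c :: e :: es) = [c] ++ (e :: es) := rfl
            rw [h2, List.getLast?_append_of_ne_nil _ (by simp)]
          by_cases hany : ∃ x ∈ (e :: es), x ≠ ' '
          · -- cs contains a non-space
            have htr : ((∃ x ∈ (c :: e :: es), x ≠ ' ') ∧ (c :: e :: es).getLast? = some ' ')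
                ↔ ((∃ x ∈ (e :: es), x ≠ ' ') ∧ (e :: es).getLast? = some ' ') := by
              constructor
              · rintro ⟨-, h2⟩; exact ⟨hany, by rw [← hlast]; exact h2⟩
              · rintro ⟨-, h2⟩; exact ⟨⟨c, by simp, hc⟩, by rw [hlast]; exact h2⟩
            rw [hL, hIH]
            simp only [htr]
            rw [if_neg (show ¬ (c :: e :: es).head? = some ' ' by simp [hc])]
            by_cases he : e = ' '
            · subst he
              rw [if_pos (show (' ' :: es).head? = some ' ' by simp)]
              have hes : ∃ x ∈ es, x ≠ ' ' := by
                obtain ⟨x, hx, hxne⟩ := hany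
                rcases List.mem_cons.mp hx with h1 | h1
                · exact absurd h1 hxne
                · exact ⟨x, h1, hxne⟩
              have hJes : Jn (' ' :: es) = Jn es := Jn_sp_cons es
              have hJc : Jn (c :: ' ' :: es) = c :: ' ' :: Jn es := by
                have h1 : splitSp (c :: ' ' :: es) = [c] :: splitSp es := by
                  rw [splitSp, if_neg (by simp [hc])]
                  simp [splitSp, modHead]
                rw [Jn, h1, List.filter_cons_of_pos (by simp)]
                cases hf : (splitSp es).filter (fun w => w ≠ []) with
                | nil => exact absurd hf (filter_splitSp_ne_nil es hes)
                | cons y ys =>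
                  have h2 : Jn es = PySem.Chars.join [' '] (y :: ys) := by rw [Jn, hf]
                  rw [PySem.Chars.join_cons_cons, h2]
                  simp
              rw [hJc, hJes]
              simp
            · rw [if_neg (by simp [he])]
              cases hsp : splitSp es with
              | nil => exact absurd hsp (splitSp_ne_nil es)
              | cons p ps =>
                have h1 : splitSp (e :: es) = (e :: p) :: ps := by
                  rw [splitSp, if_neg (by simp [he]), hsp]; rfl
                have hJc : Jn (c :: e :: es) = c :: Jn (e :: es) := by
                  have h2 : splitSp (c :: e :: es) = (c :: e :: p) :: ps := by
                    rw [splitSp, if_neg (by simp [hc]), h1]; rfl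
                  rw [Jn, h2, Jn, h1, List.filter_cons_of_pos (by simp),
                    List.filter_cons_of_pos (by simp)]
                  exact join_cons_ne c (e :: p) _
                rw [hJc]
                simp
          · -- cs is all spaces (and nonempty)
            simp only [not_exists, not_and, not_not] at hany
            have hany : ∀ x ∈ (e :: es), x = ' ' := fun x hx => by
              by_contra hne
              exact absurd hne (by simpa using hany x hx)
            have he : e = ' ' := hany e (by simp)
            have hJcs : Jn (e :: es) = [] := by
              rw [Jn, splitSp_allspace _ hany]
              simp [PySem.Chars.join, List.intercalate]
            have hlastcs : (e :: es).getLast? = some ' ' := by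
              rw [List.getLast?_eq_some_getLast (by simp)]
              exact congrArg some (hany _ (List.getLast_mem (by simp)))
            rw [if_neg (show ¬((∃ x ∈ (e :: es), x ≠ ' ') ∧ (e :: es).getLast? = some ' ') by
                rintro ⟨⟨x, hx, hxne⟩, -⟩; exact hxne (hany x hx)),
              if_pos (show (e :: es).head? = some ' ' by simp [he]), hJcs] at hIH
            rw [hL, hIH, hlast]
            rw [if_neg (by simp [hc]), if_pos ⟨⟨c, by simp, hc⟩, hlastcs⟩]
            -- Jn (c :: e :: es) = [c]
            have hsp : splitSp (e :: es) = [] :: List.replicate (es.length + 1) [] := by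
              rw [splitSp_allspace _ hany]; simp [List.replicate_succ]
            have : Jn (c :: e :: es) = [c] := by
              rw [Jn, splitSp]
              rw [if_neg (by simp [hc]), hsp]
              simp [modHead, PySem.Chars.join, List.intercalate]
            rw [this]
            simp


lemma strip_pad (x y z : List Char) (hy : y = [] ∨ y = [' ']) (hz : z = [] ∨ z = [' ']) :
    PySem.Chars.strip (y ++ (x ++ z)) = PySem.Chars.strip x := by
  have hxz : PySem.Chars.strip (x ++ z) = PySem.Chars.strip x := by
    rcases hz with rfl | rfl
    · simp
    · exact strip_sp_right x
  rcases hy with rfl | rfl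
  · simpa using hxz
  · rw [List.singleton_append, strip_sp_left]; exact hxz

lemma ab_eq : ∀ s : String, clean_spaces s = clean_spaces_alt s := by
  intro s
  rw [clean_spaces, clean_spaces_alt]
  rw [foldA s.toList [] true, List.nil_append]
  rw [replace_single, replace_single, List.map_map, splitOn_single]
  have hmap : ((fun c => if ('\n' == c) then ' ' else c) ∘ (fun c => if ('\t' == c) then ' ' else c))
      = pvG := by
    funext c; simp [Function.comp, pvG]
  rw [hmap]
  have hJ : PySem.Chars.join [' ']
      ((splitSp (s.toList.map pvG)).filter (fun w => w ≠ [])) = Jn (s.toList.map pvG) := rfl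
  rw [hJ, M (s.toList.map pvG).length _ le_rfl, List.append_assoc,
    strip_pad (Jn (s.toList.map pvG)) _ _ (by split_ifs <;> simp) (by split_ifs <;> simp)]

-- ===== VERDICT (by name: the statement is the Claim_ definition above) =====
theorem clean_spaces_spec : Claim_equal_clean_spaces := by
  intro s _
  exact ab_eq s
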